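-- pv_equiv track=rewrite | github.com/adriano-arce/Interview-Problems | 2D-Problems/Unravel-Snake/Unravel-Snake.py | get_canvas
-- ===== SOURCE A (Python) =====
-- def get_canvas(snake):
--     rows = snake.split("\n")
--     canvas = {}
--     for y, row in enumerate(rows):
--         for x, char in enumerate(row):
--             if char != " ":
--                 canvas[(x, y)] = char
--     return canvas
-- ===== SOURCE B (Python) =====
-- def get_canvas(snake):
--     # Single flat scan over the raw string with explicit x/y counters
--     # (no intermediate row list, no enumerate).
--     canvas = {}
--     x = y = 0
--     for char in snake:
--         if char == "\n":
--             y += 1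
--             x = 0
--         else:
--             if char != " ":
--                 canvas[(x, y)] = char
--             x += 1
--     return canvas
-- ===== Notes on version B (the rewrite author's own statement) =====
-- stated objective: alternative
-- what changed: Replaces split('\n') plus nested enumerate loops with one flat scan over the raw string that maintains explicit x/y counters, never building the row list.
import Mathlib
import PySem

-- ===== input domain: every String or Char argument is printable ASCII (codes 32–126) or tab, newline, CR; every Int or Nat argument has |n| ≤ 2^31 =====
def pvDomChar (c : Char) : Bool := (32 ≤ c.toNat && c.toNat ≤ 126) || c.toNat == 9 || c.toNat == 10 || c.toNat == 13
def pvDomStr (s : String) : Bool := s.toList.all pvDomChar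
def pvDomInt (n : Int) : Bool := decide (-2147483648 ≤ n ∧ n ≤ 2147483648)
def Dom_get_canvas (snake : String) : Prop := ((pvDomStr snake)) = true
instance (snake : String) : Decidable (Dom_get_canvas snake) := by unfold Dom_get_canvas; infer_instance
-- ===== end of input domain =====

-- B replaces split("\n") + nested enumerate with one flat scan keeping explicit x/y counters (alternative decomposition, same cost).

-- ===== PORT A =====
-- rows = snake.split("\n"): the separator "\n" is non-empty, so split? is always `some`.
def get_canvas (snake : String) : List (Int × Int × String) :=
  let rows := (PySem.Str.split? snake "\n").getD []
  let canvas : PySem.Dict (Int × Int) String :=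
    (PySem.List.enumerate rows 0).foldl (fun canvas yrow =>
      (PySem.List.enumerate yrow.2.toList 0).foldl (fun canvas xchar =>
        if xchar.2 ≠ ' ' then canvas.insert (xchar.1, yrow.1) (String.singleton xchar.2)
        else canvas) canvas) PySem.Dict.empty
  canvas.items.map (fun p => (p.1.1, p.1.2, p.2))

-- ===== PORT B =====
def pvScan : List Char → Int → Int → PySem.Dict (Int × Int) String → PySem.Dict (Int × Int) String
  | [], _, _, canvas => canvas
  | c :: rest, x, y, canvas =>
    if c = '\n' then pvScan rest 0 (y + 1) canvas
    else pvScan rest (x + 1) y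
      (if c ≠ ' ' then canvas.insert (x, y) (String.singleton c) else canvas)

def get_canvas_alt (snake : String) : List (Int × Int × String) :=
  (pvScan snake.toList 0 0 PySem.Dict.empty).items.map (fun p => (p.1.1, p.1.2, p.2))

-- ===== PRECONDITION & SPEC =====
def Spec_get_canvas (snake : String) (out : List (Int × Int × String)) : Prop := out = get_canvas_alt snake
instance (snake : String) (out : List (Int × Int × String)) : Decidable (Spec_get_canvas snake out) := by unfold Spec_get_canvas; infer_instance

-- ===== CLAIM (what is proved, stated in full; the proofs are below) =====
def Claim_equal_get_canvas : Prop := ∀ (snake : String), Dom_get_canvas snake → Spec_get_canvas snake (get_canvas snake)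

-- ===== LEMMAS AND PROOFS =====

/-- Structural version of splitting a char list on '\n'. -/
def pvSplit : List Char → List (List Char)
  | [] => [[]]
  | c :: rest =>
    if c = '\n' then [] :: pvSplit rest
    else match pvSplit rest with
      | [] => [[c]]
      | r :: rs => (c :: r) :: rs

/-- A's inner-loop step. -/
def pvRowStep (y : Int) (d : PySem.Dict (Int × Int) String) (xc : Int × Char) :
    PySem.Dict (Int × Int) String :=
  if xc.2 ≠ ' ' then d.insert (xc.1, y) (String.singleton xc.2) else d

/-- A's nested loops, structurally over rows as char lists. -/
def pvRowsAux : List (List Char) → Int → PySem.Dict (Int × Int) String →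
    PySem.Dict (Int × Int) String
  | [], _, d => d
  | r :: rs, y, d => pvRowsAux rs (y + 1) ((PySem.List.enumerate r 0).foldl (pvRowStep y) d)

/-- Like pvRowsAux but the first row's x-counter starts at x. -/
def pvRowsFrom : List (List Char) → Int → Int → PySem.Dict (Int × Int) String →
    PySem.Dict (Int × Int) String
  | [], _, _, d => d
  | r :: rs, x, y, d => pvRowsAux rs (y + 1) ((PySem.List.enumerate r x).foldl (pvRowStep y) d)

theorem pvSplit_ne_nil (cs : List Char) : pvSplit cs ≠ [] := by
  cases cs with
  | nil => simp [pvSplit]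
  | cons c rest =>
    simp only [pvSplit]
    split_ifs
    · simp
    · cases h : pvSplit rest <;> simp

theorem pvGo_eq (cs : List Char) : ∀ (fuel : Nat), cs.length ≤ fuel →
    ∀ (cur : List Char) (acc : List (List Char)),
    PySem.Chars.splitOn.go ['\n'] fuel cs cur acc =
      acc.reverse ++ (match pvSplit cs with
        | [] => [cur.reverse]
        | r :: rs => (cur.reverse ++ r) :: rs) := by
  induction cs with
  | nil =>
    intro fuel _ cur acc
    cases fuel <;> simp [PySem.Chars.splitOn.go, pvSplit]
  | cons c rest ih =>
    intro fuel hf cur acc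
    cases fuel with
    | zero => simp at hf
    | succ n =>
      by_cases hc : c = '\n'
      · subst hc
        have hpre : List.isPrefixOf ['\n'] ('\n' :: rest) = true := by
          simp [List.isPrefixOf]
        rw [show PySem.Chars.splitOn.go ['\n'] (n+1) ('\n' :: rest) cur acc =
              PySem.Chars.splitOn.go ['\n'] n (List.drop 1 ('\n' :: rest)) []
                (cur.reverse :: acc) by
          simp [PySem.Chars.splitOn.go, hpre]]
        simp only [List.drop_succ_cons, List.drop_zero]
        rw [ih n (by simpa using hf) [] (cur.reverse :: acc)]
        cases h : pvSplit rest with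
        | nil => exact absurd h (pvSplit_ne_nil rest)
        | cons r rs => simp [pvSplit, h]
      · have hpre : List.isPrefixOf ['\n'] (c :: rest) = false := by
          simp [List.isPrefixOf, Ne.symm hc]
        rw [show PySem.Chars.splitOn.go ['\n'] (n+1) (c :: rest) cur acc =
              PySem.Chars.splitOn.go ['\n'] n rest (c :: cur) acc by
          simp [PySem.Chars.splitOn.go, hpre]]
        rw [ih n (by simpa using hf) (c :: cur) acc]
        cases h : pvSplit rest with
        | nil => exact absurd h (pvSplit_ne_nil rest)
        | cons r rs => simp [pvSplit, h, hc]

theorem pvSplitOn_eq (cs : List Char) : PySem.Chars.splitOn cs ['\n'] = pvSplit cs := by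
  unfold PySem.Chars.splitOn
  rw [pvGo_eq cs (cs.length + 1) (by omega) [] []]
  cases h : pvSplit cs with
  | nil => exact absurd h (pvSplit_ne_nil cs)
  | cons r rs => simp

theorem pvRowsFrom_zero (rs : List (List Char)) (y : Int) (d : PySem.Dict (Int × Int) String) :
    pvRowsFrom rs 0 y d = pvRowsAux rs y d := by
  cases rs <;> rfl

theorem pvScan_eq (cs : List Char) : ∀ (x y : Int) (d : PySem.Dict (Int × Int) String),
    pvScan cs x y d = pvRowsFrom (pvSplit cs) x y d := by
  induction cs with
  | nil => intro x y d; rfl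
  | cons c rest ih =>
    intro x y d
    by_cases hc : c = '\n'
    · subst hc
      show pvScan rest 0 (y + 1) d = _
      rw [ih 0 (y + 1) d, pvRowsFrom_zero]
      simp only [pvSplit]
      
      cases h : pvSplit rest with
      | nil => exact absurd h (pvSplit_ne_nil rest)
      | cons r rs =>
        simp [pvRowsFrom, pvRowsAux, PySem.List.enumerate]
    · rw [show pvScan (c :: rest) x y d =
            pvScan rest (x + 1) y (if c ≠ ' ' then d.insert (x, y) (String.singleton c) else d) by
          simp [pvScan, hc]]
      rw [ih]
      simp only [pvSplit, if_neg hc]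
      cases h : pvSplit rest with
      | nil => exact absurd h (pvSplit_ne_nil rest)
      | cons r rs =>
        simp [pvRowsFrom, PySem.List.enumerate_cons, pvRowStep]

theorem pvEnumFold_eq (rows : List String) : ∀ (y : Int) (d : PySem.Dict (Int × Int) String),
    (PySem.List.enumerate rows y).foldl (fun canvas yrow =>
      (PySem.List.enumerate yrow.2.toList 0).foldl (fun canvas xchar =>
        if xchar.2 ≠ ' ' then canvas.insert (xchar.1, yrow.1) (String.singleton xchar.2)
        else canvas) canvas) d
      = pvRowsAux (rows.map String.toList) y d := by
  induction rows with
  | nil => intro y d; rfl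
  | cons r rs ih =>
    intro y d
    rw [PySem.List.enumerate_cons]
    simp only [List.foldl_cons, List.map_cons, pvRowsAux]
    rw [ih]
    rfl

theorem pvRows_eq (snake : String) :
    ((PySem.Str.split? snake "\n").getD []).map String.toList = pvSplit snake.toList := by
  have h := PySem.Str.split?_map snake "\n"
  have hl : ("\n".toList : List Char) = ['\n'] := rfl
  rw [hl] at h
  rw [← pvSplitOn_eq]
  cases hs : PySem.Str.split? snake "\n" with
  | none =>
    rw [hs] at h
    simp only [Option.map_none] at h
    -- Chars.split? with the non-empty separator ['\n'] is always some
    have : PySem.Chars.split? snake.toList ('\n' :: ([] : List Char)) =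
        some (PySem.Chars.splitOn snake.toList ['\n']) := by
      simp [PySem.Chars.split?]
    simp [this] at h
  | some rows =>
    rw [hs] at h
    simp only [Option.map_some] at h
    have : PySem.Chars.split? snake.toList ('\n' :: ([] : List Char)) =
        some (PySem.Chars.splitOn snake.toList ['\n']) := by
      simp [PySem.Chars.split?]
    rw [this] at h
    simpa using h

-- ===== VERDICT (by name: the statement is the Claim_ definition above) =====
theorem get_canvas_spec : Claim_equal_get_canvas := by
  intro snake _
  show get_canvas snake = get_canvas_alt snake
  simp only [get_canvas, get_canvas_alt]
  rw [pvEnumFold_eq, pvRows_eq, pvScan_eq, pvRowsFrom_zero]
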